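-- pv_equiv track=rewrite | github.com/ubcmist/ML | code/loadData.py | CheckFilesSynced
-- ===== SOURCE A (Python) =====
-- def CheckFilesSynced(output_files_list, input_files_list):
--     helper_variable = False
--     for i, input_file_address  in enumerate(input_files_list):
--         for s, output_file_address in enumerate(output_files_list):
--             if (input_file_address[:-6] == output_file_address[:-6]):
--                 helper_variable = True
--         if (helper_variable == False):
--             return False
--         else: helper_variable = False
--     return True
-- ===== SOURCE B (Python) =====
-- def CheckFilesSynced(output_files_list, input_files_list):
--     output_prefixes = {f[:-6] for f in output_files_list}
--     input_prefixes = {f[:-6] for f in input_files_list}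
--     return input_prefixes <= output_prefixes
-- ===== Notes on version B (the rewrite author's own statement) =====
-- stated objective: faster
-- what changed: Replaces the nested enumerate loops with flag/reset bookkeeping by building the two prefix sets once and returning a single subset comparison, eliminating the inner scan per input file.
import Mathlib
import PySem

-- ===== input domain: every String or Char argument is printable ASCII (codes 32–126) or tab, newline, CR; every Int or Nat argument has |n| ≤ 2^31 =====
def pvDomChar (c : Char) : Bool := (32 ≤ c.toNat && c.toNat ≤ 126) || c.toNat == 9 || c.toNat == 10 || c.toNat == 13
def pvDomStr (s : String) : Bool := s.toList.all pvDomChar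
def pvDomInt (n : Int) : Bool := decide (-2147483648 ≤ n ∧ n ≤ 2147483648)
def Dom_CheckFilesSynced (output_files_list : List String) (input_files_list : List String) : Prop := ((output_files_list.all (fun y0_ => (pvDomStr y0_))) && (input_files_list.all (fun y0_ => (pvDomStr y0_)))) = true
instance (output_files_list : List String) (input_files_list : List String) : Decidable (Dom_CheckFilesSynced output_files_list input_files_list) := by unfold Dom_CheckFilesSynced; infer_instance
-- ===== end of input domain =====

-- B replaces A's nested loops with flag bookkeeping by two prefix sets and one subset test (simpler; return value only, no side effects involved).

-- ===== PORT A =====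
-- s[:-6]
def pvPref (s : String) : String := PySem.Str.slice s none (some (-6))

-- the outer 'for input_file_address in input_files_list' with its early 'return False'
def pvLoopA (output_files_list : List String) : List String → Bool
  | [] => true
  | f :: rest =>
    -- inner loop over output_files_list setting helper_variable
    let helper_variable :=
      output_files_list.foldl (fun hv o => if pvPref f = pvPref o then true else hv) false
    if helper_variable = false then false else pvLoopA output_files_list rest

def CheckFilesSynced (output_files_list : List String) (input_files_list : List String) : Bool :=
  pvLoopA output_files_list input_files_list

-- ===== PORT B =====
def CheckFilesSynced_alt (output_files_list : List String) (input_files_list : List String) : Bool :=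
  let output_prefixes : PySem.Set String := PySem.Set.ofList (output_files_list.map pvPref)
  let input_prefixes : PySem.Set String := PySem.Set.ofList (input_files_list.map pvPref)
  PySem.Set.issubset input_prefixes output_prefixes

-- ===== PRECONDITION & SPEC =====
def Spec_CheckFilesSynced (output_files_list : List String) (input_files_list : List String) (out : Bool) : Prop :=
  out = CheckFilesSynced_alt output_files_list input_files_list
instance (output_files_list : List String) (input_files_list : List String) (out : Bool) : Decidable (Spec_CheckFilesSynced output_files_list input_files_list out) := by unfold Spec_CheckFilesSynced; infer_instance

-- ===== CLAIM =====
def Claim_equal_CheckFilesSynced : Prop := ∀ (output_files_list : List String) (input_files_list : List String), Dom_CheckFilesSynced output_files_list input_files_list → Spec_CheckFilesSynced output_files_list input_files_list (CheckFilesSynced output_files_list input_files_list)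

-- ===== LEMMAS AND PROOFS =====
lemma pvFlag_eq (f : String) (outs : List String) (b : Bool) :
    outs.foldl (fun hv o => if pvPref f = pvPref o then true else hv) b
      = (b || outs.any (fun o => pvPref f == pvPref o)) := by
  induction outs generalizing b with
  | nil => simp
  | cons o rest ih =>
    simp only [List.foldl_cons, List.any_cons, ih]
    by_cases h : pvPref f = pvPref o
    · simp [h]
    · simp [h, beq_eq_false_iff_ne.mpr h]

lemma pvLoopA_eq (outs inps : List String) :
    pvLoopA outs inps = inps.all (fun f => outs.any (fun o => pvPref f == pvPref o)) := by
  induction inps with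
  | nil => rfl
  | cons f rest ih =>
    simp only [pvLoopA, pvFlag_eq, Bool.false_or, List.all_cons, ih]
    by_cases h : outs.any (fun o => pvPref f == pvPref o) = true <;> simp [h]

lemma pvAlt_eq (outs inps : List String) :
    CheckFilesSynced_alt outs inps
      = inps.all (fun f => outs.any (fun o => pvPref f == pvPref o)) := by
  unfold CheckFilesSynced_alt PySem.Set.issubset
  rw [Bool.eq_iff_iff]
  simp only [List.all_eq_true, PySem.Set.mem_ofList, List.mem_map, List.any_eq_true, beq_iff_eq,
    PySem.Set.contains_eq_listContains, List.contains_iff_mem]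
  constructor
  · intro h f hf
    obtain ⟨o, ho, hop⟩ := h (pvPref f) ⟨f, hf, rfl⟩
    exact ⟨o, ho, hop.symm⟩
  · rintro h x ⟨a, ha, rfl⟩
    obtain ⟨o, ho, hop⟩ := h a ha
    exact ⟨o, ho, hop.symm⟩

-- ===== VERDICT =====
theorem CheckFilesSynced_spec : Claim_equal_CheckFilesSynced := by
  intro outs inps _
  unfold Spec_CheckFilesSynced CheckFilesSynced
  rw [pvLoopA_eq, pvAlt_eq]
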